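-- pv_equiv track=rewrite | github.com/BioMolecularPhysicsGroup-UNCC/MachineLearning | NN_gene_prediction/Generate_sensor_data.py | Start_codon_sensor_left
-- ===== SOURCE A (Python) =====
-- def Start_codon_sensor_left(seq):
--     midpoint = int((len(seq) - 1)/2) # center of window
--     d = 0
--     for i in range(0,midpoint):
--         d0 = seq[i:i+3]
--         if d0.upper() == "ATG":
--             if (midpoint-abs(midpoint-i)) > d:
--                 d = midpoint-abs(midpoint-i)
--     return d
-- ===== SOURCE B (Python) =====
-- def Start_codon_sensor_left(seq):
--     # backward early-exit scan: the first match from midpoint-1 downward IS the largest index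
--     midpoint = int((len(seq) - 1)/2)
--     for i in range(midpoint - 1, -1, -1):
--         if seq[i:i+3].upper() == "ATG":
--             return i
--     return 0
-- ===== Notes on version B (the rewrite author's own statement) =====
-- stated objective: simpler
-- what changed: Replaces the forward max-tracking scan (which keeps updating d = midpoint-|midpoint-i|) with a backward scan from midpoint-1 that returns the first, i.e. largest, matching index immediately, defaulting to 0.
import Mathlib
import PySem

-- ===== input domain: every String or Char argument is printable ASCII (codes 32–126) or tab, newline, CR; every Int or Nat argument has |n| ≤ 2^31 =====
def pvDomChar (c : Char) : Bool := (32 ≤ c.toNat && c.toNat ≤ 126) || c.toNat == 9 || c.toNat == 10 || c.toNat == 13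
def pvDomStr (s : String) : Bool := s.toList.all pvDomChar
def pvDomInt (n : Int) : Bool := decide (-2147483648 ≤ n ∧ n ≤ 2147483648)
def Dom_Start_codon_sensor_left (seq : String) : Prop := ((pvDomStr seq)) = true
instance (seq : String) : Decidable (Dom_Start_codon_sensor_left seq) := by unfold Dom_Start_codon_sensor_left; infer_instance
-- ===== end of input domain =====

-- B replaces A's forward max-tracking scan with a backward early-exit scan (simpler: the
-- first match from midpoint-1 downward is the largest qualifying index, returned directly).

-- ===== PORT A =====
-- forward scan i = 0 .. midpoint-1, keeping the best d = midpoint - |midpoint - i|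
def Start_codon_sensor_left (seq : String) : Int :=
  let midpoint : Int := PySem.Int.truncdiv (PySem.Str.len seq - 1) 2
  (PySem.List.pyRange 0 midpoint 1).foldl (fun d i =>
    let d0 := PySem.List.slice seq.toList (some i) (some (i + 3))
    if PySem.Chars.upper d0 = "ATG".toList then
      (if midpoint - |midpoint - i| > d then midpoint - |midpoint - i| else d)
    else d) 0

-- ===== PORT B =====
-- 'for i in range(midpoint-1, -1, -1): if seq[i:i+3].upper()=="ATG": return i' / 'return 0'
-- as a countdown recursion: pvFindBack cs (k+1) examines index k first.
def pvFindBack (cs : List Char) : Nat → Int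
  | 0 => 0
  | k + 1 =>
    if PySem.Chars.upper (PySem.List.slice cs (some (k : Int)) (some ((k : Int) + 3))) = "ATG".toList
    then (k : Int)
    else pvFindBack cs k

def Start_codon_sensor_left_alt (seq : String) : Int :=
  let midpoint : Int := PySem.Int.truncdiv (PySem.Str.len seq - 1) 2
  pvFindBack seq.toList midpoint.toNat

-- ===== PRECONDITION & SPEC =====
def Spec_Start_codon_sensor_left (seq : String) (out : Int) : Prop := out = Start_codon_sensor_left_alt seq
instance (seq : String) (out : Int) : Decidable (Spec_Start_codon_sensor_left seq out) := by unfold Spec_Start_codon_sensor_left; infer_instance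

-- ===== CLAIM (what is proved, stated in full; the proofs are below) =====
def Claim_equal_Start_codon_sensor_left : Prop := ∀ (seq : String), Dom_Start_codon_sensor_left seq → Spec_Start_codon_sensor_left seq (Start_codon_sensor_left seq)

-- ===== LEMMAS AND PROOFS =====

-- B's backward search never exceeds its starting bound
lemma pvFindBack_le (cs : List Char) : ∀ n : Nat, pvFindBack cs n ≤ (n : Int) := by
  intro n
  induction n with
  | zero => simp [pvFindBack]
  | succ k ih =>
    simp only [pvFindBack]
    split
    · omega
    · push_cast; omega

-- A's fold over range(0, n) equals B's backward search from n, for any n ≤ midpoint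
lemma foldl_eq_findBack (cs : List Char) (m : Int) :
    ∀ n : Nat, (n : Int) ≤ m →
      (List.range n).foldl (fun d (k : Nat) =>
        let d0 := PySem.List.slice cs (some ((0 : Int) + (k : Int))) (some ((0 : Int) + (k : Int) + 3))
        if PySem.Chars.upper d0 = "ATG".toList then
          (if m - |m - ((0 : Int) + (k : Int))| > d then m - |m - ((0 : Int) + (k : Int))| else d)
        else d) 0 = pvFindBack cs n := by
  intro n
  induction n with
  | zero => intro _; simp [pvFindBack]
  | succ k ih =>
    intro h
    rw [List.range_succ, List.foldl_append, ih (by push_cast at h ⊢; omega)]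
    have hk : (k : Int) < m := by push_cast at h; omega
    simp only [List.foldl_cons, List.foldl_nil, pvFindBack, zero_add]
    have habs : |m - (k : Int)| = m - (k : Int) := abs_of_nonneg (by omega)
    split
    · have hle := pvFindBack_le cs k
      rw [habs]
      split <;> omega
    · rfl

-- the Python midpoint int((len-1)/2) is never negative
lemma trunc_midpoint_nonneg (L : Nat) : 0 ≤ PySem.Int.truncdiv ((L : Int) - 1) 2 := by
  cases L with
  | zero => decide
  | succ k =>
    have : ((k + 1 : Nat) : Int) - 1 = (k : Int) := by push_cast; omega
    rw [this]
    exact Int.tdiv_nonneg (by positivity) (by norm_num)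

-- ===== VERDICT (by name: the statement is the Claim_ definition above) =====
theorem Start_codon_sensor_left_spec : Claim_equal_Start_codon_sensor_left := by
  intro seq _
  unfold Spec_Start_codon_sensor_left Start_codon_sensor_left Start_codon_sensor_left_alt
  simp only [PySem.Str.len_eq]
  set m : Int := PySem.Int.truncdiv ((seq.toList.length : Int) - 1) 2 with hm
  have hm0 : 0 ≤ m := trunc_midpoint_nonneg seq.toList.length
  rw [PySem.List.pyRange_one, sub_zero, List.foldl_map]
  have hcast : ((m.toNat : Int)) = m := Int.toNat_of_nonneg hm0
  exact foldl_eq_findBack seq.toList m m.toNat (by omega)
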